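-- pv_equiv track=rewrite | github.com/qiuda16/Dr.moto | bff/app/routers/customer_app.py | _determine_health_state
-- ===== SOURCE A (Python) =====
-- from typing import Any
--
-- def _determine_health_state(items: list[dict[str, Any]]) -> str:
--     statuses = [item.get("status") for item in items]
--     if "warning" in statuses:
--         return "warning"
--     if "notice" in statuses:
--         return "notice"
--     if "normal" in statuses:
--         return "normal"
--     return "unknown"
-- ===== SOURCE B (Python) =====
-- _RANK = {"warning": 0, "notice": 1, "normal": 2}
-- _NAMES = ["warning", "notice", "normal"]
--
-- def _determine_health_state(items):
--     best = 3
--     for item in items: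
--         r = _RANK.get(item.get("status"), 3)
--         if r < best:
--             best = r
--     return _NAMES[best] if best < 3 else "unknown"
-- ===== Notes on version B (the rewrite author's own statement) =====
-- stated objective: alternative
-- what changed: Replaced three separate membership scans over the statuses list with one table-driven pass that keeps a running best priority rank and translates it back to a name at the end.
import Mathlib
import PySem

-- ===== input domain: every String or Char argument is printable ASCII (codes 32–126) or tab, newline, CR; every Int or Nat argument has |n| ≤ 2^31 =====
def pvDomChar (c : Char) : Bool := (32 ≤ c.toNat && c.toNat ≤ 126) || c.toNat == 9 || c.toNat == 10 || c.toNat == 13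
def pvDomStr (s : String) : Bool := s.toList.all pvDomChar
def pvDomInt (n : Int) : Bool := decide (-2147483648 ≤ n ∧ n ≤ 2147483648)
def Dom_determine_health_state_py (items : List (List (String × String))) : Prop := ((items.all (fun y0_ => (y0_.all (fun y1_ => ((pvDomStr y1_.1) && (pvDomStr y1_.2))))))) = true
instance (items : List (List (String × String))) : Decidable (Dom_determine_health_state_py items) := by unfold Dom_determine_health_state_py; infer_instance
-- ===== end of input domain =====

-- B replaces A's three membership scans with one table-driven pass keeping a running best rank (alternative decomposition, same cost).

-- ===== PORT A =====
def determine_health_state_py (items : List (List (String × String))) : String :=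
  let statuses := items.map (fun item => (PySem.Dict.mk item).get? "status")
  if statuses.contains (some "warning") then "warning"
  else if statuses.contains (some "notice") then "notice"
  else if statuses.contains (some "normal") then "normal"
  else "unknown"

-- ===== PORT B =====
-- _RANK.get(s, 3)
def pvRankOf (s : Option String) : Nat :=
  if s == some "warning" then 0
  else if s == some "notice" then 1
  else if s == some "normal" then 2
  else 3

def determine_health_state_py_alt (items : List (List (String × String))) : String :=
  let best := items.foldl
    (fun b item =>
      let r := pvRankOf ((PySem.Dict.mk item).get? "status")
      if r < b then r else b) 3
  if best < 3 then
    -- _NAMES[best]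
    if best == 0 then "warning" else if best == 1 then "notice" else "normal"
  else "unknown"

-- ===== PRECONDITION & SPEC =====
def Spec_determine_health_state_py (items : List (List (String × String))) (out : String) : Prop := out = determine_health_state_py_alt items
instance (items : List (List (String × String))) (out : String) : Decidable (Spec_determine_health_state_py items out) := by unfold Spec_determine_health_state_py; infer_instance

-- ===== CLAIM (what is proved, stated in full; the proofs are below) =====
def Claim_equal_determine_health_state_py : Prop := ∀ (items : List (List (String × String))), Dom_determine_health_state_py items → Spec_determine_health_state_py items (determine_health_state_py items)

-- ===== LEMMAS AND PROOFS =====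

-- the fold computes the minimum of the accumulator and the ranks
theorem pv_fold_min (items : List (List (String × String))) :
    ∀ a : Nat, a ≤ 3 →
      items.foldl (fun b item =>
        let r := pvRankOf ((PySem.Dict.mk item).get? "status")
        if r < b then r else b) a
      = min a ((items.map (fun item => pvRankOf ((PySem.Dict.mk item).get? "status"))).foldr min 3) := by
  induction items with
  | nil =>
      intro a ha
      simp only [List.foldl_nil, List.map_nil, List.foldr_nil]
      omega
  | cons x xs ih =>
      intro a ha
      have h3 : pvRankOf ((PySem.Dict.mk x).get? "status") ≤ 3 := by
        unfold pvRankOf; split_ifs <;> omega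
      simp only [List.foldl_cons, List.map_cons, List.foldr_cons]
      rw [ih _ (by split_ifs <;> omega)]
      split_ifs with h <;> omega

-- the foldr-min over ranks equals A's cascade of membership tests
theorem pv_min_eq_cascade (items : List (List (String × String))) :
    ((items.map (fun item => pvRankOf ((PySem.Dict.mk item).get? "status"))).foldr min 3)
      = (if (items.map (fun item => (PySem.Dict.mk item).get? "status")).contains (some "warning") then 0
         else if (items.map (fun item => (PySem.Dict.mk item).get? "status")).contains (some "notice") then 1
         else if (items.map (fun item => (PySem.Dict.mk item).get? "status")).contains (some "normal") then 2
         else 3) := by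
  induction items with
  | nil => simp
  | cons x xs ih =>
      simp only [List.map_cons, List.foldr_cons, ih, List.contains_cons, Bool.or_eq_true, beq_iff_eq]
      clear ih
      generalize (PySem.Dict.mk x).get? "status" = s
      generalize ((xs.map (fun item => (PySem.Dict.mk item).get? "status")).contains (some "warning")) = b1
      generalize ((xs.map (fun item => (PySem.Dict.mk item).get? "status")).contains (some "notice")) = b2
      generalize ((xs.map (fun item => (PySem.Dict.mk item).get? "status")).contains (some "normal")) = b3
      simp only [@eq_comm _ (some "warning") s, @eq_comm _ (some "notice") s, @eq_comm _ (some "normal") s]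
      by_cases h1 : s = some "warning" <;>
      by_cases h2 : s = some "notice" <;>
      by_cases h3 : s = some "normal" <;>
      cases b1 <;> cases b2 <;> cases b3 <;>
      simp_all [pvRankOf]

-- ===== VERDICT (by name: the statement is the Claim_ definition above) =====
theorem determine_health_state_py_spec : Claim_equal_determine_health_state_py := by
  intro items _
  unfold Spec_determine_health_state_py determine_health_state_py determine_health_state_py_alt
  rw [pv_fold_min items 3 (by omega), pv_min_eq_cascade]
  cases c1 : ((items.map (fun item => (PySem.Dict.mk item).get? "status")).contains (some "warning")) <;>
  cases c2 : ((items.map (fun item => (PySem.Dict.mk item).get? "status")).contains (some "notice")) <;>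
  cases c3 : ((items.map (fun item => (PySem.Dict.mk item).get? "status")).contains (some "normal")) <;>
  simp only [c1, c2, c3] <;> decide
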